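-- pv_equiv track=rewrite | github.com/bbfighting/PredataCode | sqlcommon.py | gene_list
-- ===== SOURCE A (Python) =====
-- def gene_list(coor_dic):
--     temp_list = []
--     for acc in coor_dic.keys():
--         gene = coor_dic[acc][0]
--         if not gene in temp_list:
--             temp_list.append(gene)
--
--     temp_list.sort()
--
--     return temp_list
-- ===== SOURCE B (Python) =====
-- def gene_list(coor_dic):
--     vals = []
--     for acc in coor_dic.keys():
--         vals.append(coor_dic[acc][0])
--     vals.sort()
--     result = []
--     for g in vals:
--         if not result or result[-1] != g:
--             result.append(g)
--     return result
-- ===== Notes on version B (the rewrite author's own statement) =====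
-- stated objective: faster
-- what changed: A dedups by scanning the growing unique list for each key before sorting; B collects every first coordinate with duplicates, sorts the full multiset once, and removes duplicates in a single adjacency pass comparing each value with the last one kept.
import Mathlib
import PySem

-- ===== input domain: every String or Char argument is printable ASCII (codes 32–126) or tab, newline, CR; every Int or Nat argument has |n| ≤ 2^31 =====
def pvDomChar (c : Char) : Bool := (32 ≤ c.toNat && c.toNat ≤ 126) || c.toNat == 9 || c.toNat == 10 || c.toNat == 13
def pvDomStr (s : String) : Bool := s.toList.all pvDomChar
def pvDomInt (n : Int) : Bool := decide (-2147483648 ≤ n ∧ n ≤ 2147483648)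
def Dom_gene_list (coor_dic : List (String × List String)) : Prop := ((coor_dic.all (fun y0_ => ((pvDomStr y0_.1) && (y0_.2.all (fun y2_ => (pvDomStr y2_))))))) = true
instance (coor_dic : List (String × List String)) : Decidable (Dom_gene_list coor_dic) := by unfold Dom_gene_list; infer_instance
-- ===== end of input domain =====

-- B replaces A's membership scan of the growing unique list by sort-whole-multiset
-- then one adjacency-dedup pass (alternative decomposition, same result).

-- ===== PORT A =====
-- loop over keys, append first coordinate if not already collected, then sort
def gene_list (coor_dic : List (String × List String)) : List String :=
  let temp_list := coor_dic.foldl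
    (fun temp_list p =>
      if ¬ (PySem.List.pyGetD p.2 0 "") ∈ temp_list then
        temp_list ++ [PySem.List.pyGetD p.2 0 ""]
      else temp_list) []
  PySem.List.sorted temp_list (fun s => s)

-- ===== PORT B =====
-- collect all first coordinates (with duplicates), sort, dedup by adjacency (result[-1])
def gene_list_alt (coor_dic : List (String × List String)) : List String :=
  let vals := PySem.List.sorted
    (coor_dic.foldl (fun vals p => vals ++ [PySem.List.pyGetD p.2 0 ""]) [])
    (fun s => s)
  vals.foldl
    (fun result g =>
      if result = [] ∨ PySem.List.pyGetD result (-1) "" ≠ g then result ++ [g]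
      else result) []

-- ===== PRECONDITION & SPEC =====
-- Pre_ admits exactly the inputs on which A returns: whenever a key maps to a zero-length value list, coor_dic[acc][0] raises IndexError in A (and in B).
def Pre_gene_list (coor_dic : List (String × List String)) : Prop :=
  (coor_dic.all (fun p => !p.2.isEmpty)) = true
instance (coor_dic : List (String × List String)) : Decidable (Pre_gene_list coor_dic) := by
  unfold Pre_gene_list; infer_instance
def pvWitness_gene_list : (List (String × List String)) := [("acc1", ["geneB"]), ("acc2", ["geneA"])]

def Spec_gene_list (coor_dic : List (String × List String)) (out : List String) : Prop := out = gene_list_alt coor_dic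
instance (coor_dic : List (String × List String)) (out : List String) : Decidable (Spec_gene_list coor_dic out) := by unfold Spec_gene_list; infer_instance

-- ===== CLAIM (what is proved, stated in full; the proofs are below) =====
def Claim_equal_gene_list : Prop := ∀ (coor_dic : List (String × List String)), Dom_gene_list coor_dic → Pre_gene_list coor_dic → Spec_gene_list coor_dic (gene_list coor_dic)

-- ===== LEMMAS AND PROOFS =====

-- adjacency dedup, as a recursion on the sorted list (proof-side model of B's second loop)
def pvUniqGo (p : String) : List String → List String
  | [] => []
  | g :: rest => if g = p then pvUniqGo p rest else g :: pvUniqGo g rest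

-- membership in A's accumulator
theorem pv_A_mem (l : List (String × List String)) (acc : List String) (x : String) :
    x ∈ l.foldl
      (fun temp_list p =>
        if ¬ (PySem.List.pyGetD p.2 0 "") ∈ temp_list then
          temp_list ++ [PySem.List.pyGetD p.2 0 ""]
        else temp_list) acc
    ↔ x ∈ acc ∨ x ∈ l.map (fun p => PySem.List.pyGetD p.2 0 "") := by
  induction l generalizing acc with
  | nil => simp
  | cons p rest ih =>
    simp only [List.foldl_cons, List.map_cons, List.mem_cons]
    by_cases h : (PySem.List.pyGetD p.2 0 "") ∈ acc
    · simp only [h, not_true, if_neg, ih]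
      constructor
      · rintro (ha | hm)
        · exact Or.inl ha
        · exact Or.inr (Or.inr hm)
      · rintro (ha | he | hm)
        · exact Or.inl ha
        · exact Or.inl (he ▸ h)
        · exact Or.inr hm
    · simp only [h, not_false_iff, if_pos, ih, List.mem_append, List.mem_singleton]
      tauto

-- A's accumulator stays duplicate-free
theorem pv_A_nodup (l : List (String × List String)) (acc : List String) (h : acc.Nodup) :
    (l.foldl
      (fun temp_list p =>
        if ¬ (PySem.List.pyGetD p.2 0 "") ∈ temp_list then
          temp_list ++ [PySem.List.pyGetD p.2 0 ""]
        else temp_list) acc).Nodup := by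
  induction l generalizing acc with
  | nil => exact h
  | cons p rest ih =>
    simp only [List.foldl_cons]
    by_cases hm : (PySem.List.pyGetD p.2 0 "") ∈ acc
    · simp only [hm, not_true, if_neg]
      exact ih acc h
    · simp only [hm, not_false_iff, if_pos]
      exact ih _ (by
        simp only [List.nodup_append, List.nodup_singleton, true_and, and_true, h, true_and]
        intro a ha b hb heq
        rw [List.mem_singleton] at hb
        exact hm (hb ▸ heq ▸ ha))

-- result[-1] on a nonempty list is its last element
theorem pv_getD_neg_one (res : List String) (p : String) (d : String) :
    PySem.List.pyGetD (res ++ [p]) (-1) d = p := by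
  simp [PySem.List.pyGetD, PySem.List.pyGet?, PySem.List.pyIdx?,
        List.getElem?_concat_length]

-- B's loop, started on a nonempty accumulator, is pvUniqGo of the remaining input
theorem pv_B_fold (vals : List String) (res : List String) (p : String) :
    vals.foldl
      (fun result g =>
        if result = [] ∨ PySem.List.pyGetD result (-1) "" ≠ g then result ++ [g]
        else result) (res ++ [p])
    = res ++ p :: pvUniqGo p vals := by
  induction vals generalizing res p with
  | nil => simp [pvUniqGo]
  | cons g rest ih =>
    simp only [List.foldl_cons, pv_getD_neg_one]
    by_cases hg : g = p
    · subst hg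
      simp only [pvUniqGo, if_true]
      have : ¬ (res ++ [g] = [] ∨ g ≠ g) := by simp
      rw [if_neg this]
      exact ih res g
    · have hne : p ≠ g := fun h => hg h.symm
      have : (res ++ [p] = [] ∨ p ≠ g) := Or.inr hne
      rw [if_pos this]
      rw [ih (res ++ [p]) g]
      simp [pvUniqGo, hg]

theorem pv_go_subset (l : List String) (p x : String) (h : x ∈ pvUniqGo p l) : x ∈ l := by
  induction l generalizing p with
  | nil => simpa [pvUniqGo] using h
  | cons g rest ih =>
    simp only [pvUniqGo] at h
    by_cases hg : g = p
    · rw [if_pos hg] at h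
      exact List.mem_cons_of_mem _ (ih p h)
    · rw [if_neg hg] at h
      rcases List.mem_cons.mp h with h1 | h2
      · exact h1 ▸ List.mem_cons_self
      · exact List.mem_cons_of_mem _ (ih g h2)

theorem pv_go_mem (l : List String) (p x : String) :
    x ∈ p :: pvUniqGo p l ↔ x ∈ p :: l := by
  induction l generalizing p with
  | nil => simp [pvUniqGo]
  | cons g rest ih =>
    simp only [pvUniqGo]
    by_cases hg : g = p
    · rw [if_pos hg]
      subst hg
      rw [ih]
      simp only [List.mem_cons]
      tauto
    · rw [if_neg hg]
      constructor
      · intro h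
        rcases List.mem_cons.mp h with h1 | h2
        · exact h1 ▸ List.mem_cons_self
        · have := (ih g).mp h2
          simp only [List.mem_cons] at this ⊢
          tauto
      · intro h
        simp only [List.mem_cons] at h
        rcases h with h1 | h2 | h3
        · exact h1 ▸ List.mem_cons_self
        · refine List.mem_cons_of_mem _ ?_
          exact (ih g).mpr (h2 ▸ List.mem_cons_self)
        · refine List.mem_cons_of_mem _ ?_
          exact (ih g).mpr (List.mem_cons_of_mem _ h3)

theorem pv_go_pairwise (l : List String) (p : String)
    (h : List.Pairwise (· ≤ ·) (p :: l)) :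
    List.Pairwise (· < ·) (p :: pvUniqGo p l) := by
  induction l generalizing p with
  | nil => simp [pvUniqGo]
  | cons g rest ih =>
    rw [List.pairwise_cons] at h
    obtain ⟨hp, htail⟩ := h
    simp only [pvUniqGo]
    by_cases hg : g = p
    · rw [if_pos hg]
      refine ih p (List.pairwise_cons.mpr ⟨?_, (List.pairwise_cons.mp htail).2⟩)
      intro x hx
      exact hp x (List.mem_cons_of_mem _ hx)
    · rw [if_neg hg]
      have hpg : p < g :=
        lt_of_le_of_ne (hp g List.mem_cons_self) (fun h => hg h.symm)
      have hrec := ih g htail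
      rw [List.pairwise_cons]
      refine ⟨?_, hrec⟩
      intro x hx
      rcases List.mem_cons.mp hx with h1 | h2
      · exact h1 ▸ hpg
      · have hx' : x ∈ rest := pv_go_subset rest g x h2
        have hgx : g ≤ x := (List.pairwise_cons.mp htail).1 x hx'
        exact lt_of_lt_of_le hpg hgx

-- ===== VERDICT (by name: the statement is the Claim_ definition above) =====
theorem gene_list_spec : Claim_equal_gene_list := by
  intro coor_dic _hdom _hpre
  unfold Spec_gene_list gene_list gene_list_alt
  rw [PySem.List.foldl_append_singleton_eq_map (fun p => PySem.List.pyGetD p.2 0 "") coor_dic []]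
  simp only [List.nil_append]
  set M := coor_dic.map (fun p => PySem.List.pyGetD p.2 0 "") with hM
  cases hv : PySem.List.sorted M (fun s => s) with
  | nil =>
    have hMnil : M = [] := (PySem.List.sorted_eq_nil_iff M (fun s => s) false).mp hv
    have hc : coor_dic = [] := List.map_eq_nil_iff.mp hMnil
    subst hc
    simp only [List.foldl_nil]
    exact (PySem.List.sorted_eq_nil_iff [] (fun s => s) false).mpr rfl
  | cons v vt =>
    -- evaluate B's loop
    have hB : (v :: vt).foldl
        (fun result g =>
          if result = [] ∨ PySem.List.pyGetD result (-1) "" ≠ g then result ++ [g]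
          else result) []
        = v :: pvUniqGo v vt := by
      simp only [List.foldl_cons]
      rw [if_pos (Or.inl trivial)]
      simp only [List.nil_append]
      have := pv_B_fold vt [] v
      simp only [List.nil_append] at this
      exact this
    rw [hB]
    -- A's accumulator
    have hnodupA := pv_A_nodup coor_dic [] List.nodup_nil
    -- sortedness of vals
    have hpw : List.Pairwise (· ≤ ·) (v :: vt) := by
      have := PySem.List.sorted_pairwise M (fun s => s)
      rw [hv] at this
      exact this
    have hlt : List.Pairwise (· < ·) (v :: pvUniqGo v vt) := pv_go_pairwise vt v hpw
    have hnodupB : (v :: pvUniqGo v vt).Nodup := hlt.imp ne_of_lt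
    -- membership chain
    have hmemv : ∀ x, x ∈ (v :: vt) ↔ x ∈ M := by
      intro x
      have := PySem.List.sorted_perm M (fun s => s) false
      rw [hv] at this
      exact this.mem_iff
    have hperm : (v :: pvUniqGo v vt).Perm
        (coor_dic.foldl
          (fun temp_list p =>
            if ¬ (PySem.List.pyGetD p.2 0 "") ∈ temp_list then
              temp_list ++ [PySem.List.pyGetD p.2 0 ""]
            else temp_list) []) := by
      rw [List.perm_ext_iff_of_nodup hnodupB hnodupA]
      intro a
      rw [pv_go_mem vt v a, hmemv a, pv_A_mem coor_dic [] a]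
      simp [hM]
    exact PySem.List.sorted_eq_of_perm_of_pairwise_lt _ _ (fun s => s) hperm hlt
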